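-- pv_equiv track=rewrite | github.com/Shibinashiq/Leet-code | 2032-two-out-of-three/2032-two-out-of-three.py | twoOutOfThree
-- ===== SOURCE A (Python) =====
-- from typing import List
--
-- def twoOutOfThree(nums1: List[int], nums2: List[int], nums3: List[int]) -> List[int]:
--     result_set = set()
--
--     for num in set(nums1):
--         if num in nums2 or num in nums3:
--             result_set.add(num)
--
--     for num in set(nums2):
--         if num in nums1 or num in nums3:
--             result_set.add(num)
--
--     for num in set(nums3):
--         if num in nums1 or num in nums2:
--             result_set.add(num)
--
--     return list(result_set)
-- ===== SOURCE B (Python) =====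
-- from typing import List
--
-- def twoOutOfThree(nums1: List[int], nums2: List[int], nums3: List[int]) -> List[int]:
--     counts = {}
--     for arr in (nums1, nums2, nums3):
--         for v in set(arr):
--             counts[v] = counts.get(v, 0) + 1
--     return list({v for v, c in counts.items() if c >= 2})
-- ===== Notes on version B (the rewrite author's own statement) =====
-- stated objective: faster
-- what changed: Replaces A's pairwise cross-array linear membership scans with a single presence-count dictionary built from each array's distinct elements, then selects values counted at least twice.
import Mathlib
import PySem

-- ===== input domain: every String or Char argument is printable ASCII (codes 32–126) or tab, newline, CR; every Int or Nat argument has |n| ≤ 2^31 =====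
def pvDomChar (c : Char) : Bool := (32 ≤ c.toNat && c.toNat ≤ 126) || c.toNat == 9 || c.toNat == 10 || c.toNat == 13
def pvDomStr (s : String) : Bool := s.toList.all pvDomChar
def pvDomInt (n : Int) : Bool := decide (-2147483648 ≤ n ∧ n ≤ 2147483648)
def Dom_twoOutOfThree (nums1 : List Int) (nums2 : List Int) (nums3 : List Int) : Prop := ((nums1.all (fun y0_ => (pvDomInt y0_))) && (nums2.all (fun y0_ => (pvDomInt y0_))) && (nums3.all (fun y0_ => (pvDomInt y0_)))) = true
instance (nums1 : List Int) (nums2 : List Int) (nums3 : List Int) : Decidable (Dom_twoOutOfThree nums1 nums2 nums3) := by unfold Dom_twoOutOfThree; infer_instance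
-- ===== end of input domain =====

-- B replaces A's pairwise cross-array membership scans with one presence-count dict over distinct
-- elements; both return list(set(...)), so the proved equality is of the sets' insertion-order lists.

-- ===== PORT A =====
def twoOutOfThree (nums1 : List Int) (nums2 : List Int) (nums3 : List Int) : List Int :=
  let r1 := (PySem.Set.ofList nums1).foldl
    (fun acc num => if num ∈ nums2 ∨ num ∈ nums3 then PySem.Set.add acc num else acc)
    (PySem.Set.empty : PySem.Set Int)
  let r2 := (PySem.Set.ofList nums2).foldl
    (fun acc num => if num ∈ nums1 ∨ num ∈ nums3 then PySem.Set.add acc num else acc) r1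
  let r3 := (PySem.Set.ofList nums3).foldl
    (fun acc num => if num ∈ nums1 ∨ num ∈ nums2 then PySem.Set.add acc num else acc) r2
  r3

-- ===== PORT B =====
def twoOutOfThree_alt (nums1 : List Int) (nums2 : List Int) (nums3 : List Int) : List Int :=
  let counts : PySem.Dict Int Int :=
    [nums1, nums2, nums3].foldl
      (fun d arr => (PySem.Set.ofList arr).foldl
        (fun d v => d.insert v (d.getD v 0 + 1)) d)
      PySem.Dict.empty
  PySem.Set.ofList ((counts.items.filter (fun p => decide (2 ≤ p.2))).map Prod.fst)

-- ===== PRECONDITION & SPEC =====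
def Spec_twoOutOfThree (nums1 : List Int) (nums2 : List Int) (nums3 : List Int) (out : List Int) : Prop := out = twoOutOfThree_alt nums1 nums2 nums3
instance (nums1 : List Int) (nums2 : List Int) (nums3 : List Int) (out : List Int) : Decidable (Spec_twoOutOfThree nums1 nums2 nums3 out) := by unfold Spec_twoOutOfThree; infer_instance

-- ===== CLAIM (what is proved, stated in full; the proofs are below) =====
def Claim_equal_twoOutOfThree : Prop := ∀ (nums1 : List Int) (nums2 : List Int) (nums3 : List Int), Dom_twoOutOfThree nums1 nums2 nums3 → Spec_twoOutOfThree nums1 nums2 nums3 (twoOutOfThree nums1 nums2 nums3)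

-- ===== LEMMAS AND PROOFS =====

-- filtering commutes with Python set(·)'s ordered dedup
theorem pv_filter_add (p : Int → Bool) (s : PySem.Set Int) (x : Int) :
    List.filter p (PySem.Set.add s x) =
      if p x then PySem.Set.add (List.filter p s) x else List.filter p s := by
  rw [PySem.Set.add_eq_ite, PySem.Set.add_eq_ite]
  by_cases hx : x ∈ s
  · by_cases hp : p x = true
    · simp [hx, hp, List.mem_filter]
    · simp [hx, hp]
  · by_cases hp : p x = true
    · simp [hx, hp, List.mem_filter, List.filter_append]
    · simp [hx, hp, List.filter_append]

theorem pv_ofList_filter (p : Int → Bool) (L : List Int) :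
    PySem.Set.ofList (L.filter p) = List.filter p (PySem.Set.ofList L) := by
  induction L using List.reverseRecOn with
  | nil => simp [PySem.Set.ofList_nil]
  | append_singleton xs x ih =>
    rw [PySem.Set.ofList_append_singleton, pv_filter_add, List.filter_append]
    by_cases hp : p x = true
    · simp [hp, PySem.Set.ofList_append_singleton, ih]
    · simp [hp, ih]

-- count of v in the concatenation of the three deduped arrays = in how many arrays v occurs
theorem pv_count_concat (nums1 nums2 nums3 : List Int) (v : Int) :
    (PySem.Set.ofList nums1 ++ (PySem.Set.ofList nums2 ++ PySem.Set.ofList nums3)).count v =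
      (if v ∈ nums1 then 1 else 0) + (if v ∈ nums2 then 1 else 0) + (if v ∈ nums3 then 1 else 0) := by
  have h : ∀ l : List Int, (PySem.Set.ofList l).count v = if v ∈ l then 1 else 0 := by
    intro l
    by_cases hv : v ∈ l
    · rw [if_pos hv]
      exact List.count_eq_one_of_mem (PySem.Set.nodup_ofList l) ((PySem.Set.mem_ofList l v).2 hv)
    · rw [if_neg hv]
      exact List.count_eq_zero_of_not_mem (fun h => hv ((PySem.Set.mem_ofList l v).1 h))
  simp [List.count_append, h]
  omega

-- ===== VERDICT (by name: the statement is the Claim_ definition above) =====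
theorem twoOutOfThree_spec : Claim_equal_twoOutOfThree := by
  intro nums1 nums2 nums3 _
  unfold Spec_twoOutOfThree twoOutOfThree twoOutOfThree_alt
  simp only [List.foldl, PySem.List.foldl_ite_eq_foldl_filter]
  rw [← List.foldl_append, ← List.foldl_append, ← List.foldl_append,
      ← List.foldl_append]
  rw [show (PySem.Set.empty : PySem.Set Int) = [] from rfl, ← PySem.Set.ofList_eq_foldl,
      PySem.Dict.foldl_insert_getD_add_one_eq_counter, PySem.Dict.items_counter]
  rw [List.filter_map, List.map_map]
  simp only [Function.comp_def, List.map_id']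
  conv_rhs => rw [← pv_ofList_filter, PySem.Set.ofList_ofList]
  congr 1
  rw [List.filter_append, List.filter_append]
  congr 1
  · refine List.filter_congr ?_
    intro x hx
    have hx1 : x ∈ nums1 := (PySem.Set.mem_ofList nums1 x).1 hx
    rw [decide_eq_decide, pv_count_concat]
    by_cases h2 : x ∈ nums2 <;> by_cases h3 : x ∈ nums3 <;> simp [hx1, h2, h3]
  congr 1
  · refine List.filter_congr ?_
    intro x hx
    have hx2 : x ∈ nums2 := (PySem.Set.mem_ofList nums2 x).1 hx
    rw [decide_eq_decide, pv_count_concat]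
    by_cases h1 : x ∈ nums1 <;> by_cases h3 : x ∈ nums3 <;> simp [hx2, h1, h3]
  · refine List.filter_congr ?_
    intro x hx
    have hx3 : x ∈ nums3 := (PySem.Set.mem_ofList nums3 x).1 hx
    rw [decide_eq_decide, pv_count_concat]
    by_cases h1 : x ∈ nums1 <;> by_cases h2 : x ∈ nums2 <;> simp [hx3, h1, h2]
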